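-- pv_equiv track=rewrite | github.com/34mer/Merged-Repo | scripts/check_cosmohedron_move_classes.py | enumerate_bracketings
-- ===== SOURCE A (Python) =====
-- from itertools import combinations
-- from typing import Iterable
--
-- Edge = tuple[int, int]
--
-- Bracket = frozenset[int]
--
-- Bracketing = frozenset[Bracket]
--
-- def bracket_vertices(edges: list[Edge], bracket: Bracket) -> set[int]:
--     vertices: set[int] = set()
--     for edge_index in bracket:
--         vertices.update(edges[edge_index])
--     return vertices
--
-- def is_connected_edge_subset(edges: list[Edge], subset: Iterable[int]) -> bool:
--     bracket = frozenset(subset)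
--     if not bracket:
--         return False
--     vertices = bracket_vertices(edges, bracket)
--     seen = {next(iter(vertices))}
--     changed = True
--     while changed:
--         changed = False
--         for edge_index in bracket:
--             a, b = edges[edge_index]
--             if a in seen and b not in seen:
--                 seen.add(b)
--                 changed = True
--             if b in seen and a not in seen:
--                 seen.add(a)
--                 changed = True
--     return seen == vertices
--
-- def connected_brackets(edges: list[Edge]) -> list[Bracket]:
--     edge_count = len(edges)
--     return [
--         frozenset(candidate)
--         for size in range(1, edge_count + 1)
--         for candidate in combinations(range(edge_count), size)
--         if is_connected_edge_subset(edges, candidate)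
--     ]
--
-- def brackets_compatible(edges: list[Edge], left: Bracket, right: Bracket) -> bool:
--     if left <= right or right <= left:
--         return True
--     return bracket_vertices(edges, left).isdisjoint(bracket_vertices(edges, right))
--
-- def is_valid_bracketing(edges: list[Edge], bracketing: Bracketing) -> bool:
--     full = frozenset(range(len(edges)))
--     if full not in bracketing:
--         return False
--     for bracket in bracketing:
--         if not is_connected_edge_subset(edges, bracket):
--             return False
--     return all(
--         brackets_compatible(edges, left, right)
--         for left, right in combinations(bracketing, 2)
--     )
--
-- def enumerate_bracketings(edges: list[Edge]) -> list[Bracketing]: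
--     full = frozenset(range(len(edges)))
--     non_full_brackets = [bracket for bracket in connected_brackets(edges) if bracket != full]
--     bracketings: list[Bracketing] = []
--     for size in range(len(non_full_brackets) + 1):
--         for selected in combinations(non_full_brackets, size):
--             bracketing = frozenset(set(selected) | {full})
--             if is_valid_bracketing(edges, bracketing):
--                 bracketings.append(bracketing)
--     return bracketings
-- ===== SOURCE B (Python) =====
-- # B: backtracking clique search with pruning over the pairwise bracket-compatibility
-- # relation, instead of A's filter over all 2^m subsets of brackets; early exit when
-- # the whole edge graph is disconnected.
-- from itertools import combinations
--
--
-- def _verts(edges, bracket):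
--     vs = set()
--     for i in bracket:
--         vs.update(edges[i])
--     return vs
--
--
-- def _connected(edges, subset):
--     S = list(subset)
--     if not S:
--         return False
--     verts = _verts(edges, S)
--     seen = {next(iter(verts))}
--     for _ in range(len(verts)):
--         for i in S:
--             a, b = edges[i]
--             if a in seen:
--                 seen.add(b)
--             if b in seen:
--                 seen.add(a)
--     return seen == verts
--
--
-- def _compatible(edges, left, right):
--     return left <= right or right <= left or _verts(edges, left).isdisjoint(_verts(edges, right))
--
--
-- def enumerate_bracketings(edges):
--     n = len(edges)
--     full = frozenset(range(n))
--     if not _connected(edges, full):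
--         return []
--     brackets = [frozenset(c)
--                 for size in range(1, n)
--                 for c in combinations(range(n), size)
--                 if _connected(edges, c)]
--     cliques = [[]]
--
--     def grow(chosen, rest):
--         for k, b in enumerate(rest):
--             if all(_compatible(edges, c, b) for c in chosen):
--                 nxt = chosen + [b]
--                 cliques.append(nxt)
--                 grow(nxt, rest[k + 1:])
--
--     grow([], brackets)
--     return [frozenset(c) | {full}
--             for k in range(len(brackets) + 1)
--             for c in cliques if len(c) == k]
-- ===== Notes on version B (the rewrite author's own statement) =====
-- stated objective: alternative
-- what changed: A filters all 2^m subsets of the m connected non-full brackets through a full validity re-check; B precomputes the bracket list once, runs a backtracking (DFS) clique search that prunes any partial selection as soon as one pair is incompatible (so incompatible supersets are never visited), groups the cliques by size to reproduce A's output order, and returns early when the edge graph is disconnected.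
import Mathlib
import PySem

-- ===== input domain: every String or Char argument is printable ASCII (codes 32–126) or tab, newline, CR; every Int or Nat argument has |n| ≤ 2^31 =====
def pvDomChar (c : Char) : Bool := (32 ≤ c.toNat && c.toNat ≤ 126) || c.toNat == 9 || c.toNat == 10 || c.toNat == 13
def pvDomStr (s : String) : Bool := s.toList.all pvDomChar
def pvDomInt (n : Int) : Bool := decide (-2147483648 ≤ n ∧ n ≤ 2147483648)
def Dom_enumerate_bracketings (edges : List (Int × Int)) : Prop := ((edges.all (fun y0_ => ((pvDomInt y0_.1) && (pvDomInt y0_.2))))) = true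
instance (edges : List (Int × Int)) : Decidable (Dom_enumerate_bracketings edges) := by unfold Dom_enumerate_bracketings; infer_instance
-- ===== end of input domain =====

-- B replaces A's scan of all 2^m subsets of brackets by a backtracking clique search that
-- prunes incompatible partial selections (objective: alternative algorithm; it avoids A's
-- per-subset revalidation, but the output itself can be exponentially large, so no speed
-- claim is made). Equivalence of the return value is proved for every input (both total).

-- edges[i]; every index used by either program comes from range(len(edges)), so the
-- default is never reached
def pvEdgeAt (edges : List (Int × Int)) (i : Int) : Int × Int := (PySem.List.pyGet? edges i).getD (0, 0)

-- itertools.combinations over a list, in itertools order (shared: both Source A and Source B call it)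
def combosC {α : Type} : Nat → List α → List (List α)
  | 0, _ => [[]]
  | _ + 1, [] => []
  | k + 1, x :: xs => ((combosC k xs).map (fun s => x :: s)) ++ combosC (k + 1) xs

-- ===== PORT A =====

-- bracket_vertices: vertices.update(edges[i]) adds the two endpoints in order
def bracketVerticesA (edges : List (Int × Int)) (bracket : List Int) : PySem.Set Int :=
  bracket.foldl (fun vs i =>
    PySem.Set.add (PySem.Set.add vs (pvEdgeAt edges i).1) (pvEdgeAt edges i).2) []

-- one pass of the 'while changed' body of is_connected_edge_subset (state = (seen, changed))
def sweepA (edges : List (Int × Int)) (bracket : List Int) (st : PySem.Set Int × Bool) :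
    PySem.Set Int × Bool :=
  bracket.foldl (fun st i =>
    let e := pvEdgeAt edges i
    let st1 := if st.1.contains e.1 && !(st.1.contains e.2) then (PySem.Set.add st.1 e.2, true) else st
    if st1.1.contains e.2 && !(st1.1.contains e.1) then (PySem.Set.add st1.1 e.1, true) else st1) st

-- the 'while changed' loop; fuel |vertices|+1 always suffices (seen grows every continuing pass)
def loopA (edges : List (Int × Int)) (bracket : List Int) : Nat → PySem.Set Int → PySem.Set Int
  | 0, seen => seen
  | f + 1, seen =>
    let st := sweepA edges bracket (seen, false)
    if st.2 then loopA edges bracket f st.1 else st.1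

-- is_connected_edge_subset
def isConnA (edges : List (Int × Int)) (subset : List Int) : Bool :=
  let bracket := PySem.Set.ofList subset
  if bracket = [] then false
  else
    let vertices := bracketVerticesA edges bracket
    let seen := loopA edges bracket (vertices.length + 1) [vertices.headD 0]
    PySem.Set.equal seen vertices

-- connected_brackets
def connectedBracketsA (edges : List (Int × Int)) : List (List Int) :=
  let n : Int := edges.length
  (PySem.List.pyRange 1 (n + 1) 1).flatMap (fun sz =>
    ((combosC sz.toNat (PySem.List.pyRange 0 n 1)).filter (fun c => isConnA edges c)).map
      PySem.Set.ofList)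

-- brackets_compatible
def compatA (edges : List (Int × Int)) (l r : List Int) : Bool :=
  PySem.Set.issubset l r || PySem.Set.issubset r l ||
    PySem.Set.isdisjoint (bracketVerticesA edges l) (bracketVerticesA edges r)

-- itertools.combinations(xs, 2), as pairs
def pairsC {α : Type} : List α → List (α × α)
  | [] => []
  | x :: xs => (xs.map (fun y => (x, y))) ++ pairsC xs

-- is_valid_bracketing (frozenset membership/equality is list equality here: every bracket
-- reaching this function is stored as the canonical insertion-order duplicate-free list)
def isValidA (edges : List (Int × Int)) (bracketing : List (List Int)) : Bool :=
  let full : List Int := PySem.Set.ofList (PySem.List.pyRange 0 (edges.length : Int) 1)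
  if !(bracketing.contains full) then false
  else if !(bracketing.all (fun b => isConnA edges b)) then false
  else (pairsC bracketing).all (fun p => compatA edges p.1 p.2)

def enumerate_bracketings (edges : List (Int × Int)) : List (List (List Int)) :=
  let n : Int := edges.length
  let full : List Int := PySem.Set.ofList (PySem.List.pyRange 0 n 1)
  let nonFull := (connectedBracketsA edges).filter (fun b => b != full)
  (PySem.List.pyRange 0 ((nonFull.length : Int) + 1) 1).flatMap (fun size =>
    (combosC size.toNat nonFull).filterMap (fun selected =>
      let br := PySem.Set.union (PySem.Set.ofList selected) [full]
      if isValidA edges br then some br else none))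

-- ===== PORT B =====

-- _verts
def vertsB (edges : List (Int × Int)) (bracket : List Int) : PySem.Set Int :=
  bracket.foldl (fun vs i =>
    PySem.Set.add (PySem.Set.add vs (pvEdgeAt edges i).1) (pvEdgeAt edges i).2) []

-- one unconditional propagation sweep of _connected (set.add is idempotent, no flag)
def sweepB (edges : List (Int × Int)) (S : List Int) (seen : PySem.Set Int) : PySem.Set Int :=
  S.foldl (fun sn i =>
    let e := pvEdgeAt edges i
    let sn1 := if sn.contains e.1 then PySem.Set.add sn e.2 else sn
    if sn1.contains e.2 then PySem.Set.add sn1 e.1 else sn1) seen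

-- 'for _ in range(k): x = f(x)'
def iterN {α : Type} (f : α → α) : Nat → α → α
  | 0, x => x
  | k + 1, x => iterN f k (f x)

-- _connected: len(verts) sweeps always reach the closure
def connB (edges : List (Int × Int)) (subset : List Int) : Bool :=
  if subset = [] then false
  else
    let verts := vertsB edges subset
    let seen := iterN (sweepB edges subset) verts.length [verts.headD 0]
    PySem.Set.equal seen verts

-- _compatible
def compatB (edges : List (Int × Int)) (l r : List Int) : Bool :=
  PySem.Set.issubset l r || PySem.Set.issubset r l ||
    PySem.Set.isdisjoint (vertsB edges l) (vertsB edges r)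

-- grow: depth-first clique extension, pruning as soon as a candidate is incompatible
def extsB (edges : List (Int × Int)) (chosen : List (List Int)) :
    List (List Int) → List (List (List Int))
  | [] => []
  | b :: rest =>
    (if chosen.all (fun c => compatB edges c b) then
      (chosen ++ [b]) :: extsB edges (chosen ++ [b]) rest
    else []) ++ extsB edges chosen rest

def enumerate_bracketings_alt (edges : List (Int × Int)) : List (List (List Int)) :=
  let n : Int := edges.length
  let full : List Int := PySem.Set.ofList (PySem.List.pyRange 0 n 1)
  if !(connB edges full) then []
  else
    let brackets := (PySem.List.pyRange 1 n 1).flatMap (fun sz =>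
      ((combosC sz.toNat (PySem.List.pyRange 0 n 1)).filter (fun c => connB edges c)).map
        PySem.Set.ofList)
    let cliques := [] :: extsB edges [] brackets
    (PySem.List.pyRange 0 ((brackets.length : Int) + 1) 1).flatMap (fun k =>
      (cliques.filter (fun c => (c.length : Int) == k)).map (fun c =>
        PySem.Set.union (PySem.Set.ofList c) [full]))

-- ===== PRECONDITION & SPEC =====
def Spec_enumerate_bracketings (edges : List (Int × Int)) (out : List (List (List Int))) : Prop := out = enumerate_bracketings_alt edges
instance (edges : List (Int × Int)) (out : List (List (List Int))) : Decidable (Spec_enumerate_bracketings edges out) := by unfold Spec_enumerate_bracketings; infer_instance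

-- ===== CLAIM (what is proved, stated in full; the proofs are below) =====
def Claim_equal_enumerate_bracketings : Prop := ∀ (edges : List (Int × Int)), Dom_enumerate_bracketings edges → Spec_enumerate_bracketings edges (enumerate_bracketings edges)

-- ===== LEMMAS AND PROOFS =====

def pvStepA (edges : List (Int × Int)) (st : PySem.Set Int × Bool) (i : Int) : PySem.Set Int × Bool :=
  let e := pvEdgeAt edges i
  let st1 := if st.1.contains e.1 && !(st.1.contains e.2) then (PySem.Set.add st.1 e.2, true) else st
  if st1.1.contains e.2 && !(st1.1.contains e.1) then (PySem.Set.add st1.1 e.1, true) else st1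

def pvStepB (edges : List (Int × Int)) (sn : PySem.Set Int) (i : Int) : PySem.Set Int :=
  let e := pvEdgeAt edges i
  let sn1 := if sn.contains e.1 then PySem.Set.add sn e.2 else sn
  if sn1.contains e.2 then PySem.Set.add sn1 e.1 else sn1

theorem stepA_fst_eq_stepB (edges : List (Int × Int)) (s : PySem.Set Int) (c : Bool) (i : Int) :
    (pvStepA edges (s, c) i).1 = pvStepB edges s i := by
  simp only [pvStepA, pvStepB]
  by_cases h1 : (pvEdgeAt edges i).1 ∈ s <;>
    by_cases h2 : (pvEdgeAt edges i).2 ∈ s <;>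
      simp [PySem.Set.contains_iff, h1, h2, PySem.Set.add_of_mem, PySem.Set.add_of_not_mem,
        PySem.Set.mem_add, PySem.Set.contains_eq_listContains]

theorem stepA_flag_or (edges : List (Int × Int)) (st : PySem.Set Int × Bool) (i : Int) :
    (pvStepA edges st i).2 = true ∨ pvStepA edges st i = st := by
  simp only [pvStepA]; split_ifs <;> simp

theorem stepA_len_le (edges : List (Int × Int)) (st : PySem.Set Int × Bool) (i : Int) :
    st.1.length ≤ (pvStepA edges st i).1.length := by
  simp only [pvStepA, PySem.Set.add_eq_ite]
  split_ifs <;> simp_all <;> omega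

theorem stepA_grow (edges : List (Int × Int)) (s : PySem.Set Int) (i : Int)
    (h : (pvStepA edges (s, false) i).2 = true) :
    s.length < (pvStepA edges (s, false) i).1.length := by
  simp only [pvStepA] at *
  split_ifs at h ⊢ <;> simp_all [PySem.Set.add_eq_ite] <;> split_ifs <;> simp_all <;> omega

theorem stepA_fst_mem (edges : List (Int × Int)) (st : PySem.Set Int × Bool) (i : Int) :
    ∀ x ∈ (pvStepA edges st i).1, x ∈ st.1 ∨ x = (pvEdgeAt edges i).1 ∨ x = (pvEdgeAt edges i).2 := by
  simp only [pvStepA]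
  split_ifs <;> intro x hx <;> simp_all [PySem.Set.mem_add] <;> tauto

theorem stepA_nodup (edges : List (Int × Int)) (st : PySem.Set Int × Bool) (i : Int)
    (h : st.1.Nodup) : (pvStepA edges st i).1.Nodup := by
  simp only [pvStepA]
  split_ifs <;> first
    | exact h
    | exact PySem.Set.nodup_add _ _ h
    | exact PySem.Set.nodup_add _ _ (PySem.Set.nodup_add _ _ h)

theorem sweepAB_fst (edges : List (Int × Int)) (S : List Int) :
    ∀ st : PySem.Set Int × Bool,
      (S.foldl (pvStepA edges) st).1 = S.foldl (pvStepB edges) st.1 := by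
  induction S with
  | nil => intro st; rfl
  | cons i S ih =>
    intro st
    simp only [List.foldl_cons]
    rw [ih]
    congr 1
    calc (pvStepA edges st i).1 = (pvStepA edges (st.1, st.2) i).1 := by rfl
      _ = pvStepB edges st.1 i := stepA_fst_eq_stepB edges st.1 st.2 i

theorem sweepA_flag_mono (edges : List (Int × Int)) (S : List Int) :
    ∀ st : PySem.Set Int × Bool, st.2 = true → (S.foldl (pvStepA edges) st).2 = true := by
  induction S with
  | nil => intro st h; exact h
  | cons i S ih =>
    intro st h
    simp only [List.foldl_cons]
    apply ih
    rcases stepA_flag_or edges st i with h' | h'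
    · exact h'
    · rw [h']; exact h

theorem sweepA_len_le (edges : List (Int × Int)) (S : List Int) :
    ∀ st : PySem.Set Int × Bool, st.1.length ≤ (S.foldl (pvStepA edges) st).1.length := by
  induction S with
  | nil => intro st; exact le_refl _
  | cons i S ih =>
    intro st
    simp only [List.foldl_cons]
    exact le_trans (stepA_len_le edges st i) (ih _)

theorem sweepA_stable (edges : List (Int × Int)) (S : List Int) :
    ∀ s : PySem.Set Int, (S.foldl (pvStepA edges) (s, false)).2 = false →
      (S.foldl (pvStepA edges) (s, false)).1 = s := by
  induction S with
  | nil => intro s _; rfl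
  | cons i S ih =>
    intro s h
    simp only [List.foldl_cons] at *
    rcases stepA_flag_or edges (s, false) i with h' | h'
    · have := sweepA_flag_mono edges S (pvStepA edges (s, false) i)
        (by rw [show pvStepA edges (s, false) i = ((pvStepA edges (s, false) i).1, (pvStepA edges (s, false) i).2) from rfl] at h' ⊢; exact h')
      rw [this] at h; exact absurd h (by simp)
    · rw [h'] at h ⊢; exact ih s h

theorem sweepA_grow (edges : List (Int × Int)) (S : List Int) :
    ∀ s : PySem.Set Int, (S.foldl (pvStepA edges) (s, false)).2 = true →
      s.length < (S.foldl (pvStepA edges) (s, false)).1.length := by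
  induction S with
  | nil => intro s h; simp at h
  | cons i S ih =>
    intro s h
    simp only [List.foldl_cons] at *
    cases hf : (pvStepA edges (s, false) i).2
    · rcases stepA_flag_or edges (s, false) i with h' | h'
      · rw [h'] at hf; exact absurd hf (by simp)
      · rw [h'] at h ⊢; exact ih s h
    · have h1 : s.length < (pvStepA edges (s, false) i).1.length := stepA_grow edges s i hf
      have h2 := sweepA_len_le edges S (pvStepA edges (s, false) i)
      omega

theorem sweepA_mem (edges : List (Int × Int)) (S : List Int) :
    ∀ st : PySem.Set Int × Bool, ∀ x ∈ (S.foldl (pvStepA edges) st).1,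
      x ∈ st.1 ∨ ∃ i ∈ S, x = (pvEdgeAt edges i).1 ∨ x = (pvEdgeAt edges i).2 := by
  induction S with
  | nil => intro st x hx; exact Or.inl hx
  | cons i S ih =>
    intro st x hx
    simp only [List.foldl_cons] at hx
    rcases ih _ x hx with h | ⟨j, hj, hx'⟩
    · rcases stepA_fst_mem edges st i x h with h' | h'
      · exact Or.inl h'
      · exact Or.inr ⟨i, by simp, h'⟩
    · exact Or.inr ⟨j, by simp [hj], hx'⟩

theorem sweepA_nodup (edges : List (Int × Int)) (S : List Int) :
    ∀ st : PySem.Set Int × Bool, st.1.Nodup → (S.foldl (pvStepA edges) st).1.Nodup := by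
  induction S with
  | nil => intro st h; exact h
  | cons i S ih =>
    intro st h
    simp only [List.foldl_cons]
    exact ih _ (stepA_nodup edges st i h)


theorem iterN_fixed {α : Type} (f : α → α) (x : α) (h : f x = x) :
    ∀ m, iterN f m x = x := by
  intro m
  induction m with
  | zero => rfl
  | succ k ih => simp only [iterN, h]; exact ih

def pvVStep (edges : List (Int × Int)) (vs : PySem.Set Int) (i : Int) : PySem.Set Int :=
  PySem.Set.add (PySem.Set.add vs (pvEdgeAt edges i).1) (pvEdgeAt edges i).2

theorem vertsB_eq_foldl (edges : List (Int × Int)) (b : List Int) :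
    vertsB edges b = b.foldl (pvVStep edges) [] := rfl

theorem bracketVerticesA_eq_vertsB (edges : List (Int × Int)) (b : List Int) :
    bracketVerticesA edges b = vertsB edges b := rfl

theorem sweepA_eq_foldl (edges : List (Int × Int)) (S : List Int) (st : PySem.Set Int × Bool) :
    sweepA edges S st = S.foldl (pvStepA edges) st := rfl

theorem sweepB_eq_foldl (edges : List (Int × Int)) (S : List Int) (s : PySem.Set Int) :
    sweepB edges S s = S.foldl (pvStepB edges) s := rfl

theorem vfold_mem_mono (edges : List (Int × Int)) (S : List Int) :
    ∀ acc : PySem.Set Int, ∀ x ∈ acc, x ∈ S.foldl (pvVStep edges) acc := by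
  induction S with
  | nil => intro acc x hx; exact hx
  | cons i S ih =>
    intro acc x hx
    simp only [List.foldl_cons]
    exact ih _ x (by simp [pvVStep, PySem.Set.mem_add, hx])

theorem vfold_endpoint (edges : List (Int × Int)) (S : List Int) :
    ∀ acc : PySem.Set Int, ∀ i ∈ S,
      (pvEdgeAt edges i).1 ∈ S.foldl (pvVStep edges) acc ∧
      (pvEdgeAt edges i).2 ∈ S.foldl (pvVStep edges) acc := by
  induction S with
  | nil => intro acc i hi; simp at hi
  | cons j S ih =>
    intro acc i hi
    simp only [List.foldl_cons]
    rcases List.mem_cons.1 hi with h | h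
    · subst h
      constructor
      · exact vfold_mem_mono edges S _ _ (by simp [pvVStep, PySem.Set.mem_add])
      · exact vfold_mem_mono edges S _ _ (by simp [pvVStep, PySem.Set.mem_add])
    · exact ih _ i h

theorem vfold_ne_nil (edges : List (Int × Int)) (S : List Int) (i : Int) (hi : i ∈ S) :
    vertsB edges S ≠ [] := by
  intro h
  have := (vfold_endpoint edges S [] i hi).1
  rw [← vertsB_eq_foldl, h] at this
  simp at this

theorem nodup_length_le {α : Type} [DecidableEq α] (s V : List α)
    (hn : s.Nodup) (hs : ∀ x ∈ s, x ∈ V) : s.length ≤ V.length :=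
  List.Subperm.length_le (List.subperm_of_subset hn hs)

theorem loop_eq_iter (edges : List (Int × Int)) (S : List Int) :
    ∀ f m : Nat, ∀ s : PySem.Set Int, s.Nodup → (∀ x ∈ s, x ∈ vertsB edges S) →
      (vertsB edges S).length + 1 ≤ f + s.length →
      (vertsB edges S).length ≤ m + s.length →
      loopA edges S f s = iterN (sweepB edges S) m s := by
  intro f
  induction f with
  | zero =>
    intro m s hn hs hf _
    exact absurd (nodup_length_le s _ hn hs) (by omega)
  | succ f ih =>
    intro m s hn hs hf hm
    have hsub : ∀ x ∈ (sweepA edges S (s, false)).1, x ∈ vertsB edges S := by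
      intro x hx
      rw [sweepA_eq_foldl] at hx
      rcases sweepA_mem edges S (s, false) x hx with h | ⟨i, hi, h⟩
      · exact hs x h
      · rcases h with h | h <;> subst h
        · exact (by rw [vertsB_eq_foldl]; exact (vfold_endpoint edges S [] i hi).1)
        · exact (by rw [vertsB_eq_foldl]; exact (vfold_endpoint edges S [] i hi).2)
    simp only [loopA]
    cases hfl : (sweepA edges S (s, false)).2
    · simp only [Bool.false_eq_true, if_neg, ite_false]
      have hst : (sweepA edges S (s, false)).1 = s := by
        rw [sweepA_eq_foldl] at hfl ⊢; exact sweepA_stable edges S s hfl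
      rw [hst]
      have hfix : sweepB edges S s = s := by
        rw [sweepB_eq_foldl, ← sweepAB_fst edges S (s, false), sweepA_eq_foldl] at *
        exact hst
      exact (iterN_fixed _ s hfix m).symm
    · simp only [ite_true]
      have hgrow : s.length < (sweepA edges S (s, false)).1.length := by
        rw [sweepA_eq_foldl] at hfl ⊢; exact sweepA_grow edges S s hfl
      have hnd : (sweepA edges S (s, false)).1.Nodup := by
        rw [sweepA_eq_foldl]; exact sweepA_nodup edges S (s, false) hn
      have hlen : (sweepA edges S (s, false)).1.length ≤ (vertsB edges S).length :=
        nodup_length_le _ _ hnd hsub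
      cases m with
      | zero => omega
      | succ m' =>
        have hBs : sweepB edges S s = (sweepA edges S (s, false)).1 := by
          rw [sweepB_eq_foldl, sweepA_eq_foldl, sweepAB_fst edges S (s, false)]
        simp only [iterN, hBs]
        exact ih m' _ hnd hsub (by omega) (by omega)

theorem conn_eq (edges : List (Int × Int)) (S : List Int) (hS : S.Nodup) :
    isConnA edges S = connB edges S := by
  unfold isConnA connB
  simp only [PySem.Set.ofList_eq_self_of_nodup S hS]
  by_cases hnil : S = []
  · simp [hnil]
  · simp only [if_neg hnil]
    rw [bracketVerticesA_eq_vertsB]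
    congr 1
    rcases S with _ | ⟨i, S'⟩
    · exact absurd rfl hnil
    · have hne : vertsB edges (i :: S') ≠ [] := vfold_ne_nil edges (i :: S') i (by simp)
      have hmem : (List.head? (vertsB edges (i :: S'))).getD 0 ∈ vertsB edges (i :: S') := by
        rcases h : vertsB edges (i :: S') with _ | ⟨v, vs⟩
        · exact absurd h hne
        · simp
      exact loop_eq_iter edges (i :: S') ((vertsB edges (i :: S')).length + 1)
        (vertsB edges (i :: S')).length [(vertsB edges (i :: S')).headD 0]
        (by simp) (by intro x hx; simp at hx; subst hx; exact hmem) (by simp) (by simp)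

theorem combos_sublist {α : Type} : ∀ (l : List α) (k : Nat) (s : List α),
    s ∈ combosC k l → s.Sublist l := by
  intro l
  induction l with
  | nil => intro k s hs; cases k <;> simp [combosC] at hs <;> simp [hs]
  | cons x xs ih =>
    intro k s hs
    cases k with
    | zero => simp [combosC] at hs; simp [hs]
    | succ k =>
      simp only [combosC, List.mem_append, List.mem_map] at hs
      rcases hs with ⟨t, ht, rfl⟩ | hs
      · exact List.Sublist.cons₂ x (ih k t ht)
      · exact List.Sublist.cons x (ih (k + 1) s hs)

theorem combos_length {α : Type} : ∀ (l : List α) (k : Nat) (s : List α),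
    s ∈ combosC k l → s.length = k := by
  intro l
  induction l with
  | nil => intro k s hs; cases k <;> simp [combosC] at hs <;> simp [hs]
  | cons x xs ih =>
    intro k s hs
    cases k with
    | zero => simp [combosC] at hs; simp [hs]
    | succ k =>
      simp only [combosC, List.mem_append, List.mem_map] at hs
      rcases hs with ⟨t, ht, rfl⟩ | hs
      · simp [ih k t ht]
      · exact ih (k + 1) s hs

theorem combos_nil_of_gt {α : Type} : ∀ (l : List α) (k : Nat), l.length < k → combosC k l = [] := by
  intro l
  induction l with
  | nil => intro k hk; cases k with | zero => omega | succ k => rfl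
  | cons x xs ih =>
    intro k hk
    cases k with
    | zero => omega
    | succ k =>
      simp only [combosC]
      rw [ih k (by simp at hk; omega), ih (k + 1) (by simp at hk ⊢; omega)]
      rfl

theorem combos_self {α : Type} : ∀ (l : List α), combosC l.length l = [l] := by
  intro l
  induction l with
  | nil => rfl
  | cons x xs ih =>
    simp only [List.length_cons, combosC]
    rw [ih, combos_nil_of_gt xs (xs.length + 1) (by omega)]
    rfl

theorem combos_nodup {α : Type} : ∀ (l : List α) (k : Nat), l.Nodup → (combosC k l).Nodup := by
  intro l
  induction l with
  | nil => intro k _; cases k <;> simp [combosC]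
  | cons x xs ih =>
    intro k hnd
    rcases List.nodup_cons.1 hnd with ⟨hx, hxs⟩
    cases k with
    | zero => simp [combosC]
    | succ k =>
      simp only [combosC]
      apply List.Nodup.append
      · exact List.Nodup.map (fun a b h => by injection h) (ih k hxs)
      · exact ih (k + 1) hxs
      · intro s hs1 hs2
        rcases List.mem_map.1 hs1 with ⟨t, _, rfl⟩
        have hsub := combos_sublist xs (k + 1) _ hs2
        exact hx (hsub.subset (by simp))

theorem pairsC_all_iff {α : Type} (p : α × α → Bool) :
    ∀ (u v : List α), ((pairsC (u ++ v)).all p = true) ↔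
      ((pairsC u).all p = true ∧ (∀ a ∈ u, ∀ b ∈ v, p (a, b) = true) ∧ (pairsC v).all p = true) := by
  intro u v
  induction u with
  | nil => simp [pairsC]
  | cons x u ih =>
    simp only [List.cons_append, pairsC, List.all_append, List.all_map, Bool.and_eq_true,
      List.all_eq_true, Function.comp, List.mem_append, List.mem_cons] at ih ⊢
    constructor
    · rintro ⟨⟨hu, hv⟩, h3⟩
      obtain ⟨i1, i2, i3⟩ := ih.1 h3
      refine ⟨⟨hu, i1⟩, ?_, i3⟩
      rintro a (rfl | ha) b hb
      · exact hv b hb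
      · exact i2 a ha b hb
    · rintro ⟨⟨h1, h2⟩, h3, h4⟩
      exact ⟨⟨h1, fun y hy => h3 x (Or.inl rfl) y hy⟩,
        ih.2 ⟨h2, fun a ha b hb => h3 a (Or.inr ha) b hb, h4⟩⟩

def pvQ (edges : List (Int × Int)) (c : List (List Int)) : Bool :=
  (pairsC c).all (fun pr => compatB edges pr.1 pr.2)

theorem Q_prefix (edges : List (Int × Int)) (c s : List (List Int))
    (h : pvQ edges (c ++ s) = true) : pvQ edges c = true :=
  ((pairsC_all_iff _ c s).1 h).1

theorem Q_snoc (edges : List (Int × Int)) (c : List (List Int)) (b : List Int) :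
    pvQ edges (c ++ [b]) = true ↔
      (pvQ edges c = true ∧ ∀ x ∈ c, compatB edges x b = true) := by
  unfold pvQ
  rw [pairsC_all_iff]
  simp [pairsC]

def tailSubs {α : Type} : List α → List (List α)
  | [] => []
  | x :: xs => ((([] : List α) :: tailSubs xs).map (fun s => x :: s)) ++ tailSubs xs

theorem tailSubs_ne_nil {α : Type} : ∀ (l : List α), ∀ s ∈ tailSubs l, s ≠ [] := by
  intro l
  induction l with
  | nil => intro s hs; simp [tailSubs] at hs
  | cons x xs ih =>
    intro s hs
    simp only [tailSubs, List.mem_append, List.mem_map, List.mem_cons] at hs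
    rcases hs with ⟨t, _, rfl⟩ | hs
    · simp
    · exact ih s hs

theorem exts_eq (edges : List (Int × Int)) :
    ∀ (rest : List (List Int)) (chosen : List (List Int)), pvQ edges chosen = true →
      extsB edges chosen rest =
        ((tailSubs rest).map (fun s => chosen ++ s)).filter (pvQ edges) := by
  intro rest
  induction rest with
  | nil => intro chosen _; rfl
  | cons b rest ih =>
    intro chosen hQ
    simp only [extsB, tailSubs, List.map_append, List.map_map, List.filter_append, List.map_cons,
      List.append_nil, Function.comp]
    have hcompm : ((fun s => chosen ++ s) ∘ fun s : List (List Int) => b :: s) =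
        (fun s => (chosen ++ [b]) ++ s) := by funext s; simp
    rw [hcompm]
    by_cases hall : chosen.all (fun c => compatB edges c b) = true
    · rw [if_pos hall]
      have hQb : pvQ edges (chosen ++ [b]) = true :=
        (Q_snoc edges chosen b).2 ⟨hQ, fun x hx => List.all_eq_true.1 hall x hx⟩
      rw [List.filter_cons_of_pos hQb]
      congr 1
      · rw [ih (chosen ++ [b]) hQb]
      · exact ih chosen hQ
    · rw [if_neg hall]
      have hQb : ¬ pvQ edges (chosen ++ [b]) = true := by
        intro h
        exact hall (List.all_eq_true.2 ((Q_snoc edges chosen b).1 h).2)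
      rw [List.filter_cons_of_neg hQb]
      have hz : List.filter (pvQ edges) (List.map (fun s => (chosen ++ [b]) ++ s) (tailSubs rest)) = [] := by
        rw [List.filter_eq_nil_iff]
        intro a ha
        rcases List.mem_map.1 ha with ⟨t, _, rfl⟩
        intro hQa
        exact hQb (Q_prefix edges (chosen ++ [b]) t hQa)
      rw [hz, ih chosen hQ]

theorem subs_filter_len {α : Type} : ∀ (l : List α) (k : Nat),
    (([] :: tailSubs l).filter (fun c => c.length == k)) = combosC k l := by
  intro l
  induction l with
  | nil =>
    intro k
    cases k with
    | zero => rfl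
    | succ k => simp [tailSubs, combosC]
  | cons x xs ih =>
    intro k
    cases k with
    | zero =>
      simp only [tailSubs, List.filter_cons, List.filter_append]
      rw [List.filter_eq_nil_iff.2, List.filter_eq_nil_iff.2]
      · rfl
      · intro a ha
        have := tailSubs_ne_nil xs a ha
        simp [List.length_eq_zero_iff, this]
      · intro a ha
        rcases List.mem_map.1 ha with ⟨t, _, rfl⟩
        simp
    | succ k =>
      simp only [tailSubs, List.filter_cons, List.filter_append]
      have h0 : (([] : List α).length == k + 1) = false := by simp
      rw [h0]
      simp only [Bool.false_eq_true, if_neg, ite_false]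
      rw [List.filter_map]
      have hcomp : ((fun c => c.length == k + 1) ∘ (fun s : List α => x :: s)) =
          (fun c => c.length == k) := by
        funext c; simp
      rw [hcomp]
      have hA : List.filter (fun c => c.length == k + 1) (tailSubs xs) =
          List.filter (fun c => c.length == k + 1) ([] :: tailSubs xs) := by
        simp [List.filter_cons]
      rw [hA, ih k, ih (k + 1)]
      rfl

theorem compatAB (edges : List (Int × Int)) (l r : List Int) :
    compatA edges l r = compatB edges l r := rfl

def pvIdx (n : Int) : List Int := PySem.List.pyRange 0 n 1

theorem pvIdx_nodup (n : Int) : (pvIdx n).Nodup := PySem.List.nodup_pyRange_one 0 n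

theorem pvIdx_length (edges : List (Int × Int)) :
    (pvIdx (edges.length : Int)).length = edges.length := by
  simp [pvIdx, PySem.List.length_pyRange_one]

theorem ofList_full (edges : List (Int × Int)) :
    PySem.Set.ofList (pvIdx (edges.length : Int)) = pvIdx (edges.length : Int) :=
  PySem.Set.ofList_eq_self_of_nodup _ (pvIdx_nodup _)

-- the filtered combination chunks, with the frozenset wrapper and A's connectivity removed
theorem chunk_eq (edges : List (Int × Int)) (k : Nat) :
    ((combosC k (pvIdx (edges.length : Int))).filter (fun c => isConnA edges c)).map
        PySem.Set.ofList =
      (combosC k (pvIdx (edges.length : Int))).filter (fun c => connB edges c) := by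
  have hnd : ∀ c ∈ combosC k (pvIdx (edges.length : Int)), c.Nodup := fun c hc =>
    (pvIdx_nodup _).sublist (combos_sublist _ k c hc)
  rw [List.filter_congr (fun c hc => by rw [conn_eq edges c (hnd c hc)])]
  rw [List.map_congr_left (fun c hc => PySem.Set.ofList_eq_self_of_nodup c
    (hnd c (List.mem_of_mem_filter hc)))]
  exact List.map_id _

theorem flatMap_filter {α β : Type} (l : List α) (f : α → List β) (p : β → Bool) :
    (l.flatMap f).filter p = l.flatMap (fun a => (f a).filter p) := by
  induction l with
  | nil => rfl
  | cons x l ih => simp [List.flatMap_cons, List.filter_append, ih]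

-- chunks keyed by length: a flatMap of nodup chunks with distinct keys is nodup
theorem nodup_flatMap_key {α β : Type} (key : β → Nat) (g : α → Nat) :
    ∀ (l : List α) (f : α → List β),
      (∀ a ∈ l, (f a).Nodup) → (∀ a ∈ l, ∀ b ∈ f a, key b = g a) → (l.map g).Nodup →
      (l.flatMap f).Nodup := by
  intro l
  induction l with
  | nil => intro f _ _ _; simp
  | cons x l ih =>
    intro f h1 h2 h3
    simp only [List.flatMap_cons]
    apply List.Nodup.append
    · exact h1 x (by simp)
    · exact ih f (fun a ha => h1 a (by simp [ha])) (fun a ha => h2 a (by simp [ha]))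
        (by simp at h3; exact h3.2)
    · intro b hb hb'
      rcases List.mem_flatMap.1 hb' with ⟨a, ha, hba⟩
      have e1 : key b = g x := h2 x (by simp) b hb
      have e2 : key b = g a := h2 a (by simp [ha]) b hba
      simp only [List.map_cons, List.nodup_cons] at h3
      exact h3.1 (by rw [List.mem_map]; exact ⟨a, ha, by omega⟩)

theorem flatMap_congr_mem {α β : Type} (l : List α) (f g : α → List β)
    (h : ∀ a ∈ l, f a = g a) : l.flatMap f = l.flatMap g := by
  induction l with
  | nil => rfl
  | cons x l ih =>
    simp only [List.flatMap_cons]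
    rw [h x (by simp), ih (fun a ha => h a (by simp [ha]))]

def pvBrackets (edges : List (Int × Int)) : List (List Int) :=
  (PySem.List.pyRange 1 (edges.length : Int) 1).flatMap (fun sz =>
    (combosC sz.toNat (pvIdx (edges.length : Int))).filter (fun c => connB edges c))

theorem connectedBracketsA_eq (edges : List (Int × Int)) :
    connectedBracketsA edges =
      (PySem.List.pyRange 1 ((edges.length : Int) + 1) 1).flatMap (fun sz =>
        (combosC sz.toNat (pvIdx (edges.length : Int))).filter (fun c => connB edges c)) := by
  unfold connectedBracketsA
  exact flatMap_congr_mem _ _ _ (fun sz _ => chunk_eq edges sz.toNat)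

theorem nonFull_eq (edges : List (Int × Int)) :
    (connectedBracketsA edges).filter (fun b => b != pvIdx (edges.length : Int)) =
      pvBrackets edges := by
  simp only [connectedBracketsA_eq]
  set n : Int := (edges.length : Int) with hn
  have h0n : 0 ≤ n := by positivity
  rw [flatMap_filter]
  by_cases hz : n = 0
  · rw [hz]
    rw [PySem.List.pyRange_one_eq_nil (by norm_num), show pvBrackets edges = [] from ?_]
    · rfl
    · unfold pvBrackets
      rw [← hn, hz, PySem.List.pyRange_one_eq_nil (by norm_num)]
      rfl
  · have h1n : 1 ≤ n := by omega
    rw [PySem.List.pyRange_one_append 1 n (n + 1) h1n (by omega),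
      PySem.List.pyRange_one_singleton n, List.flatMap_append]
    have hlast : [n].flatMap (fun sz =>
        ((combosC sz.toNat (pvIdx n)).filter (fun c => connB edges c)).filter
          (fun b => b != pvIdx n)) = [] := by
      have hlen : n.toNat = (pvIdx n).length := by
        simp [pvIdx, PySem.List.length_pyRange_one]
      simp only [List.flatMap_cons, List.flatMap_nil, List.append_nil]
      rw [hlen, combos_self]
      cases hc : connB edges (pvIdx n) <;> simp [List.filter, hc]
    rw [hlast, List.append_nil]
    unfold pvBrackets
    rw [← hn]
    apply flatMap_congr_mem
    intro sz hsz
    rw [List.filter_eq_self]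
    intro c hc
    have hlc : c.length = sz.toNat := combos_length _ _ c (List.mem_of_mem_filter hc)
    have hszlt : sz < n := (PySem.List.mem_pyRange_one.1 hsz).2
    have hsz1 : 1 ≤ sz := (PySem.List.mem_pyRange_one.1 hsz).1
    have : c.length < (pvIdx n).length := by
      rw [hlc]
      simp only [pvIdx, PySem.List.length_pyRange_one]
      omega
    simp only [bne_iff_ne, ne_eq]
    intro hceq
    rw [hceq] at this
    omega

theorem pvBrackets_nodup (edges : List (Int × Int)) : (pvBrackets edges).Nodup := by
  apply nodup_flatMap_key (key := List.length) (g := Int.toNat)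
  · intro a _
    exact List.Nodup.filter _ (combos_nodup _ _ (pvIdx_nodup _))
  · intro a _ b hb
    exact combos_length _ _ b (List.mem_of_mem_filter hb)
  · have hp := PySem.List.pairwise_lt_pyRange_one 1 (edges.length : Int)
    show (List.map Int.toNat (PySem.List.pyRange 1 (edges.length : Int) 1)).Pairwise (· ≠ ·)
    rw [List.pairwise_map]
    apply List.Pairwise.imp_of_mem ?_ hp
    intro a b ha _ hlt
    have h1 : 1 ≤ a := (PySem.List.mem_pyRange_one.1 ha).1
    omega

theorem idx_fold (edges : List (Int × Int)) :
    PySem.List.pyRange 0 (edges.length : Int) 1 = pvIdx (edges.length : Int) := rfl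

theorem booleq {a b : Bool} (h : a = true ↔ b = true) : a = b := by
  cases a <;> cases b <;> simp_all

theorem mem_pvBrackets (edges : List (Int × Int)) (b : List Int) (hb : b ∈ pvBrackets edges) :
    b.Sublist (pvIdx (edges.length : Int)) ∧ connB edges b = true ∧
      b.length < (pvIdx (edges.length : Int)).length := by
  rcases List.mem_flatMap.1 hb with ⟨sz, hsz, hmem⟩
  rcases List.mem_filter.1 hmem with ⟨hcomb, hconn⟩
  have hsub := combos_sublist _ _ b hcomb
  have hlen := combos_length _ _ b hcomb
  rcases PySem.List.mem_pyRange_one.1 hsz with ⟨h1, h2⟩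
  refine ⟨hsub, hconn, ?_⟩
  rw [hlen, pvIdx_length]
  omega

theorem filterMap_if {α β : Type} (p : β → Bool) (f : α → β) :
    ∀ l : List α, (l.filterMap (fun x => if p (f x) then some (f x) else none)) =
      (l.filter (fun x => p (f x))).map f := by
  intro l
  induction l with
  | nil => rfl
  | cons x l ih =>
    simp only [List.filterMap_cons, List.filter_cons]
    by_cases h : p (f x) = true
    · rw [if_pos h, if_pos h, ih]; rfl
    · rw [if_neg h, if_neg h, ih]

theorem invalid_full (edges : List (Int × Int))
    (hg : connB edges (pvIdx (edges.length : Int)) = false) (sel : List (List Int)) :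
    isValidA edges (PySem.Set.union (PySem.Set.ofList sel) [pvIdx (edges.length : Int)]) = false := by
  unfold isValidA
  simp only [idx_fold, ofList_full]
  have hmem : pvIdx (edges.length : Int) ∈
      PySem.Set.union (PySem.Set.ofList sel) [pvIdx (edges.length : Int)] :=
    (PySem.Set.mem_union _ _ _).2 (Or.inr (by simp))
  have hcont : List.contains (PySem.Set.union (PySem.Set.ofList sel)
      [pvIdx (edges.length : Int)]) (pvIdx (edges.length : Int)) = true := by
    simpa using hmem
  rw [hcont]
  have hconnA : isConnA edges (pvIdx (edges.length : Int)) = false := by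
    rw [conn_eq edges _ (pvIdx_nodup _)]; exact hg
  have hall : (PySem.Set.union (PySem.Set.ofList sel)
      [pvIdx (edges.length : Int)]).all (fun b => isConnA edges b) = false := by
    rw [List.all_eq_false]
    exact ⟨_, hmem, by simp [hconnA]⟩
  rw [hall]
  rfl

theorem valid_eq_Q (edges : List (Int × Int))
    (hconn : connB edges (pvIdx (edges.length : Int)) = true)
    (sel : List (List Int)) (hsel : sel.Sublist (pvBrackets edges)) :
    isValidA edges (PySem.Set.union (PySem.Set.ofList sel) [pvIdx (edges.length : Int)]) =
      pvQ edges sel := by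
  have hnd : sel.Nodup := (pvBrackets_nodup edges).sublist hsel
  have hmemB : ∀ b ∈ sel, b ∈ pvBrackets edges := fun b hb => hsel.subset hb
  have hofl : PySem.Set.ofList sel = sel := PySem.Set.ofList_eq_self_of_nodup sel hnd
  have hnotmem : pvIdx (edges.length : Int) ∉ sel := by
    intro h
    have := (mem_pvBrackets edges _ (hmemB _ h)).2.2
    omega
  have hbr : PySem.Set.union (PySem.Set.ofList sel) [pvIdx (edges.length : Int)] =
      sel ++ [pvIdx (edges.length : Int)] := by
    show PySem.Set.add (PySem.Set.ofList sel) (pvIdx (edges.length : Int)) = _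
    rw [hofl, PySem.Set.add_of_not_mem hnotmem]
  rw [hbr]
  unfold isValidA
  simp only [idx_fold, ofList_full]
  have hcont : (sel ++ [pvIdx (edges.length : Int)]).contains (pvIdx (edges.length : Int)) = true := by
    simp
  rw [hcont]
  have hall : (sel ++ [pvIdx (edges.length : Int)]).all (fun b => isConnA edges b) = true := by
    rw [List.all_eq_true]
    intro b hb
    rcases List.mem_append.1 hb with hb | hb
    · rcases mem_pvBrackets edges b (hmemB b hb) with ⟨hsub, hc, _⟩
      rw [conn_eq edges b ((pvIdx_nodup _).sublist hsub)]
      exact hc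
    · simp only [List.mem_singleton] at hb
      subst hb
      rw [conn_eq edges _ (pvIdx_nodup _)]
      exact hconn
  rw [hall]
  simp only [Bool.not_true, Bool.false_eq_true, if_neg, ite_false]
  apply booleq
  rw [pairsC_all_iff]
  unfold pvQ
  simp only [compatAB]
  constructor
  · rintro ⟨h1, _, _⟩; exact h1
  · intro h1
    refine ⟨h1, ?_, by simp [pairsC]⟩
    intro a ha b hb
    simp only [List.mem_singleton] at hb
    subst hb
    have hsub := (mem_pvBrackets edges a (hmemB a ha)).1
    have : PySem.Set.issubset a (pvIdx (edges.length : Int)) = true :=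
      (PySem.Set.issubset_iff _ _).2 (fun x hx => hsub.subset hx)
    simp [compatB, this]

theorem chunkB_eq (edges : List (Int × Int)) (k : Nat) :
    ((combosC k (pvIdx (edges.length : Int))).filter (fun c => connB edges c)).map
        PySem.Set.ofList =
      (combosC k (pvIdx (edges.length : Int))).filter (fun c => connB edges c) := by
  rw [List.map_congr_left (fun c hc => PySem.Set.ofList_eq_self_of_nodup c
    ((pvIdx_nodup _).sublist (combos_sublist _ k c (List.mem_of_mem_filter hc))))]
  exact List.map_id _

theorem bracketsB_eq (edges : List (Int × Int)) :
    (PySem.List.pyRange 1 (edges.length : Int) 1).flatMap (fun sz =>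
      ((combosC sz.toNat (pvIdx (edges.length : Int))).filter (fun c => connB edges c)).map
        PySem.Set.ofList) = pvBrackets edges :=
  flatMap_congr_mem _ _ _ (fun sz _ => chunkB_eq edges sz.toNat)

theorem pvQ_nil (edges : List (Int × Int)) : pvQ edges [] = true := rfl

theorem pv_main (edges : List (Int × Int)) :
    enumerate_bracketings edges = enumerate_bracketings_alt edges := by
  unfold enumerate_bracketings enumerate_bracketings_alt
  simp only [idx_fold, ofList_full, nonFull_eq, bracketsB_eq]
  cases hg : connB edges (pvIdx (edges.length : Int)) with
  | false =>
    simp only [hg, Bool.not_false, if_pos]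
    rw [List.flatMap_eq_nil_iff]
    intro k _
    rw [List.filterMap_eq_nil_iff]
    intro sel _
    rw [show isValidA edges ((PySem.Set.ofList sel).union [pvIdx (edges.length : Int)]) = false
      from invalid_full edges hg sel]
    rfl
  | true =>
    simp only [hg, Bool.not_true, Bool.false_eq_true, if_neg, ite_false]
    apply flatMap_congr_mem
    intro k hk
    have hk0 : 0 ≤ k := (PySem.List.mem_pyRange_one.1 hk).1
    -- A side
    rw [filterMap_if (fun br => isValidA edges br)
      (fun sel => (PySem.Set.ofList sel).union [pvIdx (edges.length : Int)])]
    rw [List.filter_congr (fun sel hsel => valid_eq_Q edges hg sel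
      (combos_sublist _ _ sel hsel))]
    -- B side
    rw [exts_eq edges (pvBrackets edges) [] (pvQ_nil edges)]
    simp only [List.nil_append]
    rw [show List.map (fun s : List (List Int) => s) (tailSubs (pvBrackets edges)) =
      tailSubs (pvBrackets edges) from List.map_id _]
    rw [show ([] : List (List Int)) :: List.filter (pvQ edges) (tailSubs (pvBrackets edges)) =
      List.filter (pvQ edges) ([] :: tailSubs (pvBrackets edges)) from
      (List.filter_cons_of_pos (pvQ_nil edges)).symm]
    have hpred : (fun c : List (List Int) => ((c.length : Int) == k)) =
        (fun c : List (List Int) => (c.length == k.toNat)) := by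
      funext c
      apply booleq
      rw [beq_iff_eq, beq_iff_eq]
      omega
    rw [hpred, List.filter_comm, subs_filter_len]


-- ===== VERDICT (by name: the statement is the Claim_ definition above) =====
theorem enumerate_bracketings_spec : Claim_equal_enumerate_bracketings := by
  intro edges _
  unfold Spec_enumerate_bracketings
  exact pv_main edges
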